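-- pv_equiv track=rewrite | github.com/cmdrkotori/aoc | 2023/14.py | fall_row_left
-- ===== SOURCE A (Python) =====
-- def fall_row_left(row):
--     cubes = [-1]
--     cubes.extend([i for i in range(len(row)) if row[i] == '#'])
--     cubes.append(len(row))
--     new = ['.']*len(row)
--     for i,j in zip(cubes[:-1], cubes[1::]):
--         rocks = sum([1 for k in range(i+1,j) if row[k] == 'O'])
--         if i >= 0:
--             new[i] = '#'
--         for k in range(i+1,i+1+rocks):
--             new[k] = 'O'
--     return new
-- ===== SOURCE B (Python) =====
-- def fall_row_left(row):
--     # One left-to-right pass with a write pointer: '#' pins itself and resets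
--     # the pointer past it, each 'O' lands at the pointer; everything else stays '.'.
--     new = ['.'] * len(row)
--     write = 0
--     for i, c in enumerate(row):
--         if c == '#':
--             new[i] = '#'
--             write = i + 1
--         elif c == 'O':
--             new[write] = 'O'
--             write += 1
--     return new
-- ===== Notes on version B (the rewrite author's own statement) =====
-- stated objective: simpler
-- what changed: B is a single left-to-right pass keeping only a write pointer (each 'O' lands at the pointer, '#' pins itself and resets the pointer past it), instead of A's materialized cube-index list with nested per-segment counting and write-back loops.
import Mathlib
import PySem

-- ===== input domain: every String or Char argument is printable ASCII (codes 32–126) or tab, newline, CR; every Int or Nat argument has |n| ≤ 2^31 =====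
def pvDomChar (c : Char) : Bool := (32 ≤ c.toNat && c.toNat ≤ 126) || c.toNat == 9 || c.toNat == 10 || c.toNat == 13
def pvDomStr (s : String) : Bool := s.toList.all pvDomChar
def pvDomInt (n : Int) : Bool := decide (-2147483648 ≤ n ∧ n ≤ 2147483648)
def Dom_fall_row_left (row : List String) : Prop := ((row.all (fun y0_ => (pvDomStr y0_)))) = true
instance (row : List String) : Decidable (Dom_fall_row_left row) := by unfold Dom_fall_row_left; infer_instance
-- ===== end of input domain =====

-- B slides the rocks in ONE left-to-right pass with a write pointer ('O' lands at the
-- pointer, '#' pins itself and resets the pointer past it) instead of A's cube-index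
-- list with per-segment counting and write-back; same return value, proved below.

-- ===== PORT A =====
-- A: loop body of 'for i,j in zip(cubes[:-1], cubes[1:])'
def fallStep (row : List String) (nw : List String) (p : Int × Int) : List String :=
  let i := p.1
  let j := p.2
  let rocks : Int :=
    (((PySem.List.pyRange (i+1) j 1).filter
        (fun k => PySem.List.pyGetD row k "" == "O")).map (fun _ => (1:Int))).sum
  let nw := if i ≥ 0 then PySem.List.pySetD nw i "#" else nw
  (PySem.List.pyRange (i+1) (i+1+rocks) 1).foldl (fun nw2 k => PySem.List.pySetD nw2 k "O") nw

def fall_row_left (row : List String) : List String :=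
  let n : Int := (row.length : Int)
  let cubes : List Int :=
    ([-1] ++ (PySem.List.pyRange 0 n 1).filter (fun i => PySem.List.pyGetD row i "" == "#")) ++ [n]
  let new := List.replicate row.length "."
  (List.zip (PySem.List.slice cubes none (some (-1))) (PySem.List.slice cubes (some 1) none)).foldl
    (fallStep row) new

-- ===== PORT B =====
-- B: loop body of 'for i, c in enumerate(row)' over the state (new, write)
def altStep (st : List String × Int) (p : Int × String) : List String × Int :=
  if p.2 == "#" then (PySem.List.pySetD st.1 p.1 "#", p.1 + 1)
  else if p.2 == "O" then (PySem.List.pySetD st.1 st.2 "O", st.2 + 1)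
  else st

def fall_row_left_alt (row : List String) : List String :=
  ((PySem.List.enumerate row 0).foldl altStep (List.replicate row.length ".", 0)).1

-- ===== PRECONDITION & SPEC =====
def Spec_fall_row_left (row : List String) (out : List String) : Prop := out = fall_row_left_alt row
instance (row : List String) (out : List String) : Decidable (Spec_fall_row_left row out) := by unfold Spec_fall_row_left; infer_instance

-- ===== CLAIM (what is proved, stated in full; the proofs are below) =====
def Claim_equal_fall_row_left : Prop := ∀ (row : List String), Dom_fall_row_left row → Spec_fall_row_left row (fall_row_left row)

-- ===== LEMMAS AND PROOFS =====

def Fhash (row : List String) : List Int :=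
  (PySem.List.pyRange 0 (row.length:Int) 1).filter (fun i => PySem.List.pyGetD row i "" == "#")
def cubesOf (row : List String) : List Int := ([-1] ++ Fhash row) ++ [(row.length:Int)]
def pairsL (c : List Int) : List (Int × Int) := List.zip c.dropLast c.tail

theorem fall_eq (row : List String) : fall_row_left row
    = (pairsL (cubesOf row)).foldl (fallStep row) (List.replicate row.length ".") := by
  simp [fall_row_left, pairsL, cubesOf, Fhash, PySem.List.slice_to_neg_one, PySem.List.slice_from_one]

theorem pairsL_cons (x y : Int) (l : List Int) :
    pairsL (x :: y :: l) = (x, y) :: pairsL (y :: l) := by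
  simp [pairsL, List.dropLast_cons_of_ne_nil]

theorem pairsL_map_shift (s : Int) (c : List Int) :
    pairsL (c.map (· + s)) = (pairsL c).map (fun p => (p.1 + s, p.2 + s)) := by
  simp only [pairsL, ← List.map_dropLast, ← List.map_tail, List.zip_map]
  rfl

theorem pyRange_shift (s u v : Int) :
    PySem.List.pyRange (u + s) (v + s) 1 = (PySem.List.pyRange u v 1).map (· + s) := by
  rw [PySem.List.pyRange_one, PySem.List.pyRange_one]
  have : v + s - (u + s) = v - u := by ring
  rw [this, List.map_map]
  apply List.map_congr_left
  intro k _
  simp; ring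

-- pyGetD on the prefix of an append
theorem getD_prefix (a rest : List String) (k : Int) (h0 : 0 ≤ k) (hk : k < (a.length:Int)) :
    PySem.List.pyGetD (a ++ rest) k "" = PySem.List.pyGetD a k "" := by
  rw [PySem.List.pyGetD_eq_getElem _ _ h0 (by simp; omega),
      PySem.List.pyGetD_eq_getElem _ _ h0 (by simpa using hk)]
  rw [List.getElem_append_left (by omega)]

-- pyGetD past the '#' of  a ++ "#" :: b
theorem getD_suffix (a b : List String) (x : Int) (h0 : 0 ≤ x) :
    PySem.List.pyGetD (a ++ "#" :: b) (x + ((a.length:Int) + 1)) "" = PySem.List.pyGetD b x "" := by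
  have hx : (x + ((a.length:Int) + 1)) = ((x.toNat + (a.length + 1) : Nat) : Int) := by
    push_cast; omega
  have hx2 : x = ((x.toNat : Nat) : Int) := by omega
  rw [hx, hx2, PySem.List.pyGetD_natCast, PySem.List.pyGetD_natCast]
  rcases Nat.lt_or_ge x.toNat b.length with h | h
  · rw [List.getD_eq_getElem _ _ (by simp; omega), List.getD_eq_getElem _ _ (by omega)]
    rw [List.getElem_append_right (by omega)]
    have he : x.toNat + (a.length + 1) - a.length = x.toNat + 1 := by omega
    simp only [Int.toNat_natCast]
    rw [getElem_congr rfl he (by simp only [List.length_cons]; omega), List.getElem_cons_succ]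
  · rw [List.getD_eq_default _ _ (by simp; omega), List.getD_eq_default _ _ (by omega)]

theorem getD_at_hash (a b : List String) :
    PySem.List.pyGetD (a ++ "#" :: b) (a.length:Int) "" = "#" := by
  rw [PySem.List.pyGetD_natCast]
  rw [List.getD_eq_getElem _ _ (by simp)]
  simp

-- counting a filter over range(len(a)) is List.count
theorem countO_nat (a : List String) (v : String) :
    ((List.range a.length).filter (fun k => a.getD k "" == v)).length = a.count v := by
  induction a with
  | nil => simp
  | cons x t ih =>
    have hr : List.range (t.length + 1) = 0 :: (List.range t.length).map Nat.succ :=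
      List.range_succ_eq_map
    have hcg : (List.filter ((fun k => (x :: t).getD k "" == v) ∘ Nat.succ) (List.range t.length))
         = List.filter (fun k => t.getD k "" == v) (List.range t.length) := by
      apply List.filter_congr; intro k _; simp
    rw [List.length_cons, hr, List.filter_cons, List.filter_map, hcg]
    have h0 : (x :: t).getD 0 "" = x := rfl
    rw [h0, List.count_cons]
    by_cases hx : (x == v) = true
    · rw [if_pos hx, if_pos hx, List.length_cons, List.length_map, ih]
    · rw [if_neg hx, if_neg hx, List.length_map, ih]; omega

theorem countO (a : List String) (v : String) :
    ((PySem.List.pyRange 0 (a.length:Int) 1).filter (fun k => PySem.List.pyGetD a k "" == v)).length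
      = a.count v := by
  rw [PySem.List.pyRange_zero_nat]
  rw [List.filter_map, List.length_map]
  have hcg : (List.filter ((fun k => PySem.List.pyGetD a k "" == v) ∘ (fun n : Nat => (n : Int))) (List.range a.length))
       = List.filter (fun k => a.getD k "" == v) (List.range a.length) := by
    apply List.filter_congr; intro k _; simp
  rw [hcg, countO_nat]

theorem F_nohash (row : List String) (h : "#" ∉ row) : Fhash row = [] := by
  unfold Fhash
  rw [List.filter_eq_nil_iff]
  intro k hk
  rw [PySem.List.mem_pyRange_one] at hk
  have : PySem.List.pyGetD row k "" ∈ row := by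
    apply PySem.List.pyGetD_mem
    simp [PySem.Raise.InRange]; omega
  simp only [beq_iff_eq]
  intro hc; exact h (hc ▸ this)

theorem F_decomp (a b : List String) (h : "#" ∉ a) :
    Fhash (a ++ "#" :: b)
      = (a.length:Int) :: (Fhash b).map (· + ((a.length:Int) + 1)) := by
  unfold Fhash
  have hn : ((a ++ "#" :: b).length : Int) = (a.length:Int) + 1 + (b.length:Int) := by
    simp; omega
  rw [hn]
  rw [PySem.List.pyRange_one_append 0 (a.length:Int) _ (by omega) (by omega)]
  rw [List.filter_append]
  have h1 : (PySem.List.pyRange 0 (a.length:Int) 1).filter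
      (fun i => PySem.List.pyGetD (a ++ "#" :: b) i "" == "#") = [] := by
    rw [List.filter_eq_nil_iff]
    intro k hk
    rw [PySem.List.mem_pyRange_one] at hk
    rw [getD_prefix a _ k hk.1 hk.2]
    have : PySem.List.pyGetD a k "" ∈ a := by
      apply PySem.List.pyGetD_mem
      simp [PySem.Raise.InRange]; omega
    simp only [beq_iff_eq]
    intro hc; exact h (hc ▸ this)
  rw [h1]
  rw [PySem.List.pyRange_one_cons (show (a.length:Int) < (a.length:Int) + 1 + (b.length:Int) by omega)]
  rw [List.filter_cons]
  rw [getD_at_hash]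
  simp only [BEq.rfl, if_true, List.nil_append]
  congr 1
  have hsh : PySem.List.pyRange ((a.length:Int) + 1) ((a.length:Int) + 1 + (b.length:Int)) 1
      = (PySem.List.pyRange 0 (b.length:Int) 1).map (· + ((a.length:Int) + 1)) := by
    have hs := pyRange_shift ((a.length:Int) + 1) 0 (b.length:Int)
    rw [zero_add, add_comm (b.length:Int) ((a.length:Int) + 1)] at hs
    rw [← hs]
  rw [hsh, List.filter_map]
  have hcg : List.filter ((fun i => PySem.List.pyGetD (a ++ "#" :: b) i "" == "#")
        ∘ (· + ((a.length:Int) + 1))) (PySem.List.pyRange 0 (b.length:Int) 1)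
      = List.filter (fun i => PySem.List.pyGetD b i "" == "#") (PySem.List.pyRange 0 (b.length:Int) 1) := by
    apply List.filter_congr
    intro k hk
    rw [PySem.List.mem_pyRange_one] at hk
    simp only [Function.comp_apply]
    rw [getD_suffix a b k hk.1]
  rw [hcg]

theorem cubes_decomp (a b : List String) (h : "#" ∉ a) :
    cubesOf (a ++ "#" :: b) = -1 :: (cubesOf b).map (· + ((a.length:Int) + 1)) := by
  unfold cubesOf
  rw [F_decomp a b h]
  have hn : ((a ++ "#" :: b).length : Int) = (b.length:Int) + ((a.length:Int) + 1) := by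
    simp; omega
  simp
  all_goals omega

theorem mem_cubes_ge (row : List String) (x : Int) (hx : x ∈ cubesOf row) : -1 ≤ x := by
  unfold cubesOf at hx
  rcases List.mem_append.mp hx with h | h
  · rcases List.mem_append.mp h with h | h
    · simp at h; omega
    · have hm := (List.mem_filter.mp h).1
      unfold Fhash at hm
      rw [PySem.List.mem_pyRange_one] at hm
      omega
  · simp at h; omega

def rocksOf (row : List String) (i j : Int) : Int :=
  (((PySem.List.pyRange (i+1) j 1).filter
      (fun k => PySem.List.pyGetD row k "" == "O")).map (fun _ => (1:Int))).sum

theorem fallStep_def (row : List String) (nw : List String) (i j : Int) :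
    fallStep row nw (i, j)
      = (PySem.List.pyRange (i+1) (i+1+rocksOf row i j) 1).foldl
          (fun nw2 k => PySem.List.pySetD nw2 k "O")
          (if i ≥ 0 then PySem.List.pySetD nw i "#" else nw) := rfl

theorem rocksOf_len (row : List String) (i j : Int) :
    rocksOf row i j
      = (((PySem.List.pyRange (i+1) j 1).filter
            (fun k => PySem.List.pyGetD row k "" == "O")).length : Int) := by
  unfold rocksOf
  rw [PySem.List.sum_map_const_int]
  ring

theorem rocks_first (a rest : List String) :
    rocksOf (a ++ rest) (-1) (a.length:Int) = (a.count "O" : Int) := by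
  rw [rocksOf_len]
  norm_num
  have hcg : List.filter (fun k => PySem.List.pyGetD (a ++ rest) k "" == "O")
        (PySem.List.pyRange 0 (a.length:Int) 1)
      = List.filter (fun k => PySem.List.pyGetD a k "" == "O")
        (PySem.List.pyRange 0 (a.length:Int) 1) := by
    apply List.filter_congr
    intro k hk
    rw [PySem.List.mem_pyRange_one] at hk
    rw [getD_prefix a rest k hk.1 hk.2]
  rw [hcg, countO]

theorem rocks_shift (a b : List String) (i j : Int) (hi : -1 ≤ i) :
    rocksOf (a ++ "#" :: b) (i + ((a.length:Int) + 1)) (j + ((a.length:Int) + 1))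
      = rocksOf b i j := by
  rw [rocksOf_len, rocksOf_len]
  congr 1
  have h1 : i + ((a.length:Int) + 1) + 1 = (i + 1) + ((a.length:Int) + 1) := by ring
  rw [h1, pyRange_shift, List.filter_map, List.length_map]
  congr 1
  apply List.filter_congr
  intro k hk
  rw [PySem.List.mem_pyRange_one] at hk
  simp only [Function.comp_apply]
  rw [getD_suffix a b k (by omega)]

theorem setfold_append (ks : List Int) (hks : ∀ k ∈ ks, 0 ≤ k) :
    ∀ (Q st : List String),
    (ks.map (· + (Q.length:Int))).foldl (fun nw k => PySem.List.pySetD nw k "O") (Q ++ st)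
      = Q ++ ks.foldl (fun nw k => PySem.List.pySetD nw k "O") st := by
  induction ks with
  | nil => intro Q st; simp
  | cons k ks ih =>
    intro Q st
    have hk0 : 0 ≤ k := hks k List.mem_cons_self
    simp only [List.map_cons, List.foldl_cons]
    have hstep : PySem.List.pySetD (Q ++ st) (k + (Q.length:Int)) "O"
        = Q ++ PySem.List.pySetD st k "O" := by
      rw [PySem.List.pySetD_of_nonneg _ _ (by omega), PySem.List.pySetD_of_nonneg _ _ hk0]
      have ht : (k + (Q.length:Int)).toNat = Q.length + k.toNat := by omega
      rw [ht]
      simp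
    rw [hstep, ih (fun x hx => hks x (List.mem_cons_of_mem _ hx))]

theorem fillO (c : Nat) : ∀ (pre suf : List String), c ≤ suf.length →
    (PySem.List.pyRange ((pre.length:Int)) ((pre.length:Int) + (c:Int)) 1).foldl
        (fun nw k => PySem.List.pySetD nw k "O") (pre ++ suf)
      = pre ++ List.replicate c "O" ++ suf.drop c := by
  induction c with
  | zero =>
    intro pre suf _
    rw [PySem.List.pyRange_one_eq_nil (by omega)]
    simp
  | succ c ih =>
    intro pre suf hc
    match suf with
    | [] => simp at hc
    | x :: s' =>
      rw [PySem.List.pyRange_one_cons (by omega)]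
      simp only [List.foldl_cons]
      have hset : PySem.List.pySetD (pre ++ x :: s') (pre.length:Int) "O"
          = (pre ++ ["O"]) ++ s' := by
        rw [PySem.List.pySetD_of_nonneg _ _ (by omega)]
        simp
      rw [hset]
      have hrange : PySem.List.pyRange ((pre.length:Int) + 1) ((pre.length:Int) + ((c:Nat)+1:Nat)) 1
          = PySem.List.pyRange (((pre ++ ["O"]).length:Int)) (((pre ++ ["O"]).length:Int) + (c:Int)) 1 := by
        congr 1 <;> (simp only [List.length_append, List.length_cons, List.length_nil]; push_cast; omega)
      rw [hrange]
      rw [ih (pre ++ ["O"]) s' (by simpa using hc)]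
      simp [List.replicate_succ]

theorem fallStep_first (a rest : List String) :
    fallStep (a ++ rest) (List.replicate (a ++ rest).length ".") (-1, (a.length:Int))
      = (List.replicate (a.count "O") "O" ++ List.replicate (a.length - a.count "O") ".")
          ++ List.replicate rest.length "." := by
  rw [fallStep_def]
  rw [if_neg (by omega)]
  rw [rocks_first]
  have hc : a.count "O" ≤ a.length := List.count_le_length
  have h1 : (-1:Int) + 1 = ((List.nil (α := String)).length : Int) := by simp
  have h2 : (-1:Int) + 1 + (a.count "O" : Int)
      = ((List.nil (α := String)).length : Int) + ((a.count "O" : Nat) : Int) := by simp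
  rw [h2, h1]
  have := fillO (a.count "O") [] (List.replicate (a ++ rest).length ".")
    (by simp [List.length_append]; omega)
  rw [List.nil_append] at this
  rw [this]
  rw [List.drop_replicate]
  simp only [List.nil_append, List.length_append]
  rw [show a.length + rest.length - a.count "O" = (a.length - a.count "O") + rest.length by omega]
  rw [List.replicate_add, List.append_assoc]

theorem fallStep_shift (a b : List String) (i j : Int) (hi : -1 ≤ i)
    (P : List String) (hP : P.length = a.length) (q : String) (st : List String) :
    fallStep (a ++ "#" :: b) (P ++ q :: st) (i + ((a.length:Int) + 1), j + ((a.length:Int) + 1))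
      = P ++ (if i = -1 then "#" else q) :: fallStep b st (i, j) := by
  have hs : ((a.length:Int) + 1) = ((P ++ [if i = -1 then "#" else q]).length : Int) := by
    simp [hP]
  rw [fallStep_def, fallStep_def]
  rw [rocks_shift a b i j hi]
  have hhash : (if i + ((a.length:Int) + 1) ≥ 0
        then PySem.List.pySetD (P ++ q :: st) (i + ((a.length:Int) + 1)) "#"
        else P ++ q :: st)
      = P ++ (if i = -1 then "#" else q) :: (if i ≥ 0 then PySem.List.pySetD st i "#" else st) := by
    rw [if_pos (by omega)]
    rcases eq_or_lt_of_le hi with h1 | h1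
    · rw [← h1]
      norm_num
      rw [← hP]
      simp
    · have h0 : (0:Int) ≤ i := by omega
      have hne : ¬(i = -1) := by omega
      have hge : i ≥ 0 := by omega
      rw [if_neg hne, if_pos hge]
      rw [PySem.List.pySetD_of_nonneg _ _ (by omega), PySem.List.pySetD_of_nonneg _ _ h0]
      have ht : (i + ((a.length:Int) + 1)).toNat = P.length + (1 + i.toNat) := by omega
      rw [ht]
      rw [List.set_append]
      rw [if_neg (by omega)]
      congr 1
      rw [show P.length + (1 + i.toNat) - P.length = i.toNat + 1 by omega]
      simp
  rw [hhash]
  have hr1 : i + ((a.length:Int) + 1) + 1 = (i + 1) + ((a.length:Int) + 1) := by ring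
  rw [hr1]
  rw [show i + 1 + ((a.length:Int) + 1) + rocksOf b i j
      = (i + 1 + rocksOf b i j) + ((a.length:Int) + 1) from by ring]
  rw [hs, pyRange_shift]
  have happ : P ++ (if i = -1 then "#" else q) :: (if i ≥ 0 then PySem.List.pySetD st i "#" else st)
      = (P ++ [if i = -1 then "#" else q]) ++ (if i ≥ 0 then PySem.List.pySetD st i "#" else st) := by
    simp
  rw [happ]
  rw [setfold_append _ (by
    intro k hk
    rw [PySem.List.mem_pyRange_one] at hk
    omega)]
  simp

theorem foldPairs (a b : List String) (ps : List (Int × Int))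
    (hps : ∀ p ∈ ps, -1 ≤ p.1) :
    ∀ (P : List String) (hP : P.length = a.length) (q : String) (st : List String),
    (ps.map (fun p => (p.1 + ((a.length:Int) + 1), p.2 + ((a.length:Int) + 1)))).foldl
        (fallStep (a ++ "#" :: b)) (P ++ q :: st)
      = P ++ (if ps.any (fun p => p.1 == -1) then "#" else q) :: ps.foldl (fallStep b) st := by
  induction ps with
  | nil => intro P _ q st; simp
  | cons p ps ih =>
    intro P hP q st
    obtain ⟨i, j⟩ := p
    simp only [List.map_cons, List.foldl_cons]
    rw [fallStep_shift a b i j (hps (i, j) List.mem_cons_self) P hP q st]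
    rw [ih (fun x hx => hps x (List.mem_cons_of_mem _ hx)) P hP _ _]
    congr 2
    simp only [List.any_cons]
    by_cases h1 : i = -1
    · simp [h1]
    · have hf : (i == -1) = false := by simp [h1]
      rw [if_neg h1]
      by_cases hq : (ps.any fun p => p.1 == -1) = true
      · rw [if_pos hq, if_pos (by simp [hq])]
      · rw [if_neg hq, if_neg (by simp [hf, hq])]

theorem fallA_nohash (row : List String) (h : "#" ∉ row) :
    fall_row_left row
      = List.replicate (row.count "O") "O" ++ List.replicate (row.length - row.count "O") "." := by
  rw [fall_eq]
  rw [show cubesOf row = [-1, (row.length:Int)] from by simp [cubesOf, F_nohash row h]]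
  rw [show pairsL [-1, (row.length:Int)] = [(-1, (row.length:Int))] from rfl]
  simp only [List.foldl_cons, List.foldl_nil]
  have hfst := fallStep_first row []
  simp only [List.append_nil, List.length_nil, List.replicate_zero] at hfst
  rw [hfst]

theorem fallA_decomp (a b : List String) (h : "#" ∉ a) :
    fall_row_left (a ++ "#" :: b)
      = (List.replicate (a.count "O") "O" ++ List.replicate (a.length - a.count "O") ".")
          ++ "#" :: fall_row_left b := by
  have hc : a.count "O" ≤ a.length := List.count_le_length
  rw [fall_eq, cubes_decomp a b h]
  have hcb : cubesOf b = -1 :: (Fhash b ++ [(b.length:Int)]) := by simp [cubesOf]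
  obtain ⟨z, zs, hz⟩ := List.exists_cons_of_ne_nil
    (show Fhash b ++ [(b.length:Int)] ≠ [] from by simp)
  have hmap : (cubesOf b).map (· + ((a.length:Int) + 1))
      = (-1 + ((a.length:Int) + 1)) :: (z + ((a.length:Int) + 1))
          :: zs.map (· + ((a.length:Int) + 1)) := by
    rw [hcb, hz]; simp
  rw [hmap, pairsL_cons]
  have hmap2 : (-1 + ((a.length:Int) + 1)) :: (z + ((a.length:Int) + 1))
          :: zs.map (· + ((a.length:Int) + 1))
      = (cubesOf b).map (· + ((a.length:Int) + 1)) := hmap.symm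
  rw [hmap2, pairsL_map_shift]
  simp only [List.foldl_cons]
  have hn1 : (-1:Int) + ((a.length:Int) + 1) = (a.length:Int) := by ring
  have hfst := fallStep_first a ("#" :: b)
  rw [hn1, hfst]
  have hsplit : (List.replicate (a.count "O") "O" ++ List.replicate (a.length - a.count "O") ".")
        ++ List.replicate ("#" :: b).length "."
      = (List.replicate (a.count "O") "O" ++ List.replicate (a.length - a.count "O") ".")
        ++ "." :: List.replicate b.length "." := by
    simp [List.replicate_succ]
  rw [hsplit]
  have hps : ∀ p ∈ pairsL (cubesOf b), -1 ≤ p.1 := by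
    intro p hp
    have h1 := List.of_mem_zip hp
    exact mem_cubes_ge b p.1 ((List.dropLast_sublist _).subset h1.1)
  rw [foldPairs a b (pairsL (cubesOf b)) hps _ (by simp; omega) "." (List.replicate b.length ".")]
  have hany : (pairsL (cubesOf b)).any (fun p => p.1 == -1) = true := by
    rw [hcb, hz, pairsL_cons]
    simp
  rw [hany, if_pos rfl, ← fall_eq]

-- ===== B-side lemmas =====

-- setting position |P| of P ++ x :: X replaces x
theorem set_mid (P : List String) (x v : String) (X : List String) :
    PySem.List.pySetD (P ++ x :: X) ((P.length:Int)) v = P ++ v :: X := by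
  rw [PySem.List.pySetD_of_nonneg _ _ (by omega)]
  rw [show ((P.length:Int)).toNat = P.length by omega]
  rw [List.set_append_right _ _ (le_refl _)]
  simp

-- within a '#'-free segment, the pass packs the 'O's at the write pointer
theorem segRun (a : List String) (h : "#" ∉ a) :
    ∀ (Q rest : List String) (g : Nat),
    (PySem.List.enumerate a ((Q.length:Int) + (g:Int))).foldl altStep
        (Q ++ List.replicate (g + a.length) "." ++ rest, (Q.length:Int))
      = (Q ++ List.replicate (a.count "O") "O"
           ++ List.replicate (g + a.length - a.count "O") "." ++ rest,
         (Q.length:Int) + (a.count "O" : Int)) := by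
  induction a with
  | nil => intro Q rest g; simp [PySem.List.enumerate_nil]
  | cons x t ih =>
    intro Q rest g
    have hx : x ≠ "#" := fun hc => h (by simp [hc])
    have ht : "#" ∉ t := fun hc => h (List.mem_cons_of_mem _ hc)
    rw [PySem.List.enumerate_cons, List.foldl_cons]
    have harr : Q ++ List.replicate (g + (x :: t).length) "." ++ rest
        = Q ++ "." :: (List.replicate (g + t.length) "." ++ rest) := by
      rw [List.length_cons, show g + (t.length + 1) = (g + t.length) + 1 by omega,
          List.replicate_succ]
      simp
    by_cases hO : x = "O"
    · subst hO
      have hstep : altStep (Q ++ List.replicate (g + ("O" :: t).length) "." ++ rest, (Q.length:Int))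
            ((Q.length:Int) + (g:Int), "O")
          = ((Q ++ ["O"]) ++ List.replicate (g + t.length) "." ++ rest, ((Q ++ ["O"]).length:Int)) := by
        simp only [altStep]
        rw [if_neg (by decide), if_pos (by decide), harr, set_mid]
        refine Prod.ext (by simp) (by simp)
      rw [hstep]
      have harg : (Q.length:Int) + (g:Int) + 1 = (((Q ++ ["O"]).length:Int)) + (g:Int) := by
        simp; omega
      rw [harg, ih ht (Q ++ ["O"]) rest g]
      refine Prod.ext ?_ ?_
      · have hd : g + ("O" :: t).length - (("O" :: t).count "O") = g + t.length - t.count "O" := by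
          simp [List.count_cons]; omega
        simp only [hd, List.count_cons, BEq.rfl, if_true, List.length_cons]
        rw [show t.count "O" + 1 = 1 + t.count "O" by omega, List.replicate_add]
        simp
        omega
      · simp [List.count_cons]
        push_cast
        ring
    · have hstep : altStep (Q ++ List.replicate (g + (x :: t).length) "." ++ rest, (Q.length:Int))
            ((Q.length:Int) + (g:Int), x)
          = (Q ++ List.replicate ((g + 1) + t.length) "." ++ rest, (Q.length:Int)) := by
        simp only [altStep]
        rw [if_neg (by simpa using hx), if_neg (by simpa using hO)]
        rw [List.length_cons, show g + (t.length + 1) = (g + 1) + t.length by omega]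
      rw [hstep]
      have harg : (Q.length:Int) + (g:Int) + 1 = ((Q.length:Int)) + ((g + 1 : Nat):Int) := by
        push_cast; omega
      rw [harg, ih ht Q rest (g + 1)]
      have hcnt : (x :: t).count "O" = t.count "O" := by
        simp [List.count_cons, hO]
      rw [hcnt, List.length_cons, show g + 1 + t.length = g + (t.length + 1) by omega]

-- the pass on a suffix ignores a finalized prefix once indices and pointer are shifted past it
theorem altShift (bs : List String) :
    ∀ (s w : Int), 0 ≤ s → 0 ≤ w → ∀ (P st : List String),
    (PySem.List.enumerate bs (s + (P.length:Int))).foldl altStep (P ++ st, w + (P.length:Int))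
      = (P ++ ((PySem.List.enumerate bs s).foldl altStep (st, w)).1,
         ((PySem.List.enumerate bs s).foldl altStep (st, w)).2 + (P.length:Int)) := by
  induction bs with
  | nil => intro s w _ _ P st; simp [PySem.List.enumerate_nil]
  | cons x t ih =>
    intro s w hs hw P st
    rw [PySem.List.enumerate_cons, PySem.List.enumerate_cons, List.foldl_cons, List.foldl_cons]
    have hset : ∀ (i : Int) (v : String), 0 ≤ i →
        PySem.List.pySetD (P ++ st) (i + (P.length:Int)) v = P ++ PySem.List.pySetD st i v := by
      intro i v hi
      rw [PySem.List.pySetD_of_nonneg _ _ (by omega), PySem.List.pySetD_of_nonneg _ _ hi]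
      rw [show (i + (P.length:Int)).toNat = P.length + i.toNat by omega]
      simp
    by_cases hH : x = "#"
    · subst hH
      have h1 : altStep (P ++ st, w + (P.length:Int)) (s + (P.length:Int), "#")
          = (P ++ PySem.List.pySetD st s "#", (s + 1) + (P.length:Int)) := by
        simp only [altStep]
        rw [if_pos (by decide), hset s "#" hs,
            show s + (P.length:Int) + 1 = (s + 1) + (P.length:Int) by ring]
      have h2 : altStep (st, w) (s, "#") = (PySem.List.pySetD st s "#", s + 1) := by
        simp only [altStep]
        rw [if_pos (by decide)]
      rw [h1, h2, show s + (P.length:Int) + 1 = (s + 1) + (P.length:Int) by ring]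
      exact ih (s + 1) (s + 1) (by omega) (by omega) P _
    · by_cases hO : x = "O"
      · subst hO
        have h1 : altStep (P ++ st, w + (P.length:Int)) (s + (P.length:Int), "O")
            = (P ++ PySem.List.pySetD st w "O", (w + 1) + (P.length:Int)) := by
          simp only [altStep]
          rw [if_neg (by decide), if_pos (by decide), hset w "O" hw,
              show w + (P.length:Int) + 1 = (w + 1) + (P.length:Int) by ring]
        have h2 : altStep (st, w) (s, "O") = (PySem.List.pySetD st w "O", w + 1) := by
          simp only [altStep]
          rw [if_neg (by decide), if_pos (by decide)]
        rw [h1, h2, show s + (P.length:Int) + 1 = (s + 1) + (P.length:Int) by ring]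
        exact ih (s + 1) (w + 1) (by omega) (by omega) P _
      · have h1 : altStep (P ++ st, w + (P.length:Int)) (s + (P.length:Int), x)
            = (P ++ st, w + (P.length:Int)) := by
          simp only [altStep]
          rw [if_neg (by simpa using hH), if_neg (by simpa using hO)]
        have h2 : altStep (st, w) (s, x) = (st, w) := by
          simp only [altStep]
          rw [if_neg (by simpa using hH), if_neg (by simpa using hO)]
        rw [h1, h2, show s + (P.length:Int) + 1 = (s + 1) + (P.length:Int) by ring]
        exact ih (s + 1) w (by omega) hw P _

theorem altB_nohash (row : List String) (h : "#" ∉ row) :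
    fall_row_left_alt row
      = List.replicate (row.count "O") "O" ++ List.replicate (row.length - row.count "O") "." := by
  unfold fall_row_left_alt
  have hseg := segRun row h [] [] 0
  simp only [List.length_nil, Nat.cast_zero, Int.zero_add, Nat.zero_add, zero_add,
    List.nil_append, List.append_nil] at hseg
  rw [hseg]

theorem altB_decomp (a b : List String) (h : "#" ∉ a) :
    fall_row_left_alt (a ++ "#" :: b)
      = (List.replicate (a.count "O") "O" ++ List.replicate (a.length - a.count "O") ".")
          ++ "#" :: fall_row_left_alt b := by
  have hc : a.count "O" ≤ a.length := List.count_le_length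
  unfold fall_row_left_alt
  rw [PySem.List.enumerate_append, List.foldl_append]
  -- the '#'-free prefix a
  have hseg := segRun a h [] ("." :: List.replicate b.length ".") 0
  simp only [List.length_nil, Nat.cast_zero, Int.zero_add, zero_add, Nat.zero_add,
    List.nil_append] at hseg
  rw [show List.replicate (a ++ "#" :: b).length "."
      = List.replicate a.length "." ++ "." :: List.replicate b.length "." from by
        rw [show (a ++ "#" :: b).length = a.length + (b.length + 1) from by simp,
            List.replicate_add, List.replicate_succ]]
  rw [hseg]
  -- the cube at index a.length
  rw [PySem.List.enumerate_cons, List.foldl_cons]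
  set packedA := List.replicate (a.count "O") "O" ++ List.replicate (a.length - a.count "O") "."
    with hpa
  have hplen : packedA.length = a.length := by simp [hpa]; omega
  have harr : List.replicate (a.count "O") "O" ++ List.replicate (a.length - a.count "O") "."
        ++ ("." :: List.replicate b.length ".")
      = packedA ++ "." :: List.replicate b.length "." := by
    simp [hpa, List.append_assoc]
  have hstep : altStep (List.replicate (a.count "O") "O"
        ++ List.replicate (a.length - a.count "O") "." ++ ("." :: List.replicate b.length "."),
        ((a.count "O" : Nat):Int)) ((0:Int) + (a.length:Int), "#")
      = ((packedA ++ ["#"]) ++ List.replicate b.length ".",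
         (0:Int) + (((packedA ++ ["#"]).length:Nat):Int)) := by
    simp only [altStep]
    rw [if_pos (by decide), harr,
        show (0:Int) + ((a.length:Int)) = ((packedA.length:Nat):Int) from by rw [hplen]; ring,
        set_mid]
    refine Prod.ext (by simp) (by simp [hplen])
  rw [hstep]
  -- the suffix b, shifted past the finalized prefix
  have hsh := altShift b 0 0 (le_refl 0) (le_refl 0) (packedA ++ ["#"]) (List.replicate b.length ".")
  rw [show (0:Int) + (a.length:Int) + 1 = (0:Int) + (((packedA ++ ["#"]).length:Nat):Int) from by
        simp [hplen]]
  rw [hsh]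
  simp [hpa, List.append_assoc]

-- ===== VERDICT =====
theorem fall_row_left_spec : Claim_equal_fall_row_left := by
  intro row _
  unfold Spec_fall_row_left
  have agree : ∀ (N : Nat) (r : List String), r.length ≤ N → fall_row_left r = fall_row_left_alt r := by
    intro N
    induction N with
    | zero =>
      intro r hr
      have : r = [] := List.eq_nil_of_length_eq_zero (by omega)
      subst this
      rw [fallA_nohash [] (by simp), altB_nohash [] (by simp)]
    | succ N ih =>
      intro r hlen
      by_cases hmem : "#" ∈ r
      · have hsome : (List.idxOf? "#" r).isSome := by rw [List.isSome_idxOf?]; exact hmem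
        obtain ⟨k, hk⟩ := Option.isSome_iff_exists.mp hsome
        obtain ⟨hklt, hkeq, hkmin⟩ := List.idxOf?_eq_some_iff.mp hk
        have hrow : r = r.take k ++ "#" :: r.drop (k+1) := by
          conv_lhs => rw [← List.take_append_drop k r]
          congr 1
          rw [← hkeq]
          exact (List.getElem_cons_drop hklt).symm
        have hnot : "#" ∉ r.take k := by
          intro hc
          obtain ⟨j, hj, hje⟩ := List.mem_iff_getElem.mp hc
          have hjk : j < k := by
            have := hj
            simp [List.length_take] at this
            omega
          have : (r.take k)[j] = r[j]'(by omega) := List.getElem_take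
          exact hkmin j hjk (by rw [← this, hje])
        have hbN : (r.drop (k+1)).length ≤ N := by simp [List.length_drop]; omega
        rw [hrow, fallA_decomp _ _ hnot, altB_decomp _ _ hnot, ih _ hbN]
      · rw [fallA_nohash r hmem, altB_nohash r hmem]
  exact agree row.length row le_rfl
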